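-- pv_equiv track=rewrite | github.com/egecansev/ProjectEuler | Problem_103/Special subset sums optimum.py | inequal_length_subsets_check
-- ===== SOURCE A (Python) =====
-- def inequal_length_subsets_check(A):
--     for i in range(1, (len(A) + 1) // 2):
--         left = A[0]
--         right = 0
--         for j in range(1, i + 1):
--             left += A[j]
--             right += A[-j]
--         if left <= right:
--             return False
--     return True
-- ===== SOURCE B (Python) =====
-- def inequal_length_subsets_check(A):
--     n = len(A)
--     if n < 3:
--         return True
--     left = A[0]
--     right = 0
--     for i in range(1, (n + 1) // 2):
--         left += A[i]
--         right += A[n - i]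
--         if left <= right:
--             return False
--     return True
-- ===== Notes on version B (the rewrite author's own statement) =====
-- stated objective: faster
-- what changed: B maintains the left and right sums incrementally across iterations instead of recomputing both with an inner loop for every i, turning the quadratic nested scan into one linear pass.
import Mathlib
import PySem

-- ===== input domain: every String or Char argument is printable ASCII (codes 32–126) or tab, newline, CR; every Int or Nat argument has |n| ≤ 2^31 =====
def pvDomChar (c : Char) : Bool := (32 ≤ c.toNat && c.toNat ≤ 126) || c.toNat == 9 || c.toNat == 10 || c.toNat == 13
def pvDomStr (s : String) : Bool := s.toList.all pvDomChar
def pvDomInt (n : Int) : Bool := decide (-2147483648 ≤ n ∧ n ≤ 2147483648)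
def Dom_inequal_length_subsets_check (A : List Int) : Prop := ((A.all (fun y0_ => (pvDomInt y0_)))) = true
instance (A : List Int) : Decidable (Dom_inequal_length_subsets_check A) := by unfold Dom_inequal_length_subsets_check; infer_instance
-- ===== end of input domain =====

-- B maintains the left/right sums incrementally across iterations (one linear pass)
-- instead of A's inner loop recomputing both sums for every i.  A never raises
-- (every executed index is in range), so pyGetD with default 0 is exact here.

-- ===== PORT A =====
-- inner loop of A: for j in range(1, i+1): left += A[j]; right += A[-j]
def pvInnerA (A : List Int) (i : Int) : Int × Int :=
  (PySem.List.pyRange 1 (i + 1) 1).foldl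
    (fun lr j => (lr.1 + PySem.List.pyGetD A j 0, lr.2 + PySem.List.pyGetD A (-j) 0))
    (PySem.List.pyGetD A 0 0, 0)

-- outer loop of A, with early return False
def pvOuterA (A : List Int) : List Int → Bool
  | [] => true
  | i :: rest =>
      let lr := pvInnerA A i
      if lr.1 ≤ lr.2 then false else pvOuterA A rest

def inequal_length_subsets_check (A : List Int) : Bool :=
  pvOuterA A (PySem.List.pyRange 1 (PySem.Int.floordiv ((A.length : Int) + 1) 2) 1)

-- ===== PORT B =====
-- B's loop: fuel = remaining iterations, i the index, left/right the running sums
def pvAltLoop (A : List Int) (n : Int) : Nat → Int → Int → Int → Bool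
  | 0, _, _, _ => true
  | k + 1, i, left, right =>
      let left' := left + PySem.List.pyGetD A i 0
      let right' := right + PySem.List.pyGetD A (n - i) 0
      if left' ≤ right' then false else pvAltLoop A n k (i + 1) left' right'

def inequal_length_subsets_check_alt (A : List Int) : Bool :=
  let n : Int := A.length
  if n < 3 then true
  else pvAltLoop A n (PySem.Int.floordiv (n + 1) 2 - 1).toNat 1 (PySem.List.pyGetD A 0 0) 0

-- ===== PRECONDITION & SPEC =====
def Spec_inequal_length_subsets_check (A : List Int) (out : Bool) : Prop := out = inequal_length_subsets_check_alt A
instance (A : List Int) (out : Bool) : Decidable (Spec_inequal_length_subsets_check A out) := by unfold Spec_inequal_length_subsets_check; infer_instance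

-- ===== CLAIM (what is proved, stated in full; the proofs are below) =====
def Claim_equal_inequal_length_subsets_check : Prop := ∀ (A : List Int), Dom_inequal_length_subsets_check A → Spec_inequal_length_subsets_check A (inequal_length_subsets_check A)

-- ===== LEMMAS AND PROOFS =====

-- A[-j] = A[n-j] for 1 ≤ j ≤ n
lemma pvNegIdx (A : List Int) (j : Int) (h1 : 1 ≤ j) (h2 : j ≤ (A.length : Int)) :
    PySem.List.pyGetD A (-j) 0 = PySem.List.pyGetD A ((A.length : Int) - j) 0 := by
  obtain ⟨k, rfl⟩ : ∃ k : Nat, j = (k : Int) := ⟨j.toNat, by omega⟩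
  have hk1 : 0 < k := by omega
  have hk2 : k ≤ A.length := by omega
  rw [PySem.List.pyGetD_neg_natCast A k 0 hk1 hk2]
  have : ((A.length : Int)) - (k : Int) = ((A.length - k : Nat) : Int) := by omega
  rw [this, PySem.List.pyGetD_natCast]
  exact (List.getD_eq_getElem A 0 (by omega)).symm

lemma pvInnerA_zero (A : List Int) : pvInnerA A 0 = (PySem.List.pyGetD A 0 0, 0) := by
  simp [pvInnerA, PySem.List.pyRange_one_eq_nil]

lemma pvInnerA_step (A : List Int) (i : Int) (h : 0 ≤ i) :
    pvInnerA A (i + 1) =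
      ((pvInnerA A i).1 + PySem.List.pyGetD A (i + 1) 0,
       (pvInnerA A i).2 + PySem.List.pyGetD A (-(i + 1)) 0) := by
  unfold pvInnerA
  rw [PySem.List.pyRange_one_succ_right (by omega), List.foldl_append]
  simp

lemma pvLoop_eq (A : List Int) (k : Nat) : ∀ (i : Int), 1 ≤ i →
    i + (k : Int) = PySem.Int.floordiv ((A.length : Int) + 1) 2 →
    pvOuterA A (PySem.List.pyRange i (PySem.Int.floordiv ((A.length : Int) + 1) 2) 1) =
      pvAltLoop A (A.length) k i (pvInnerA A (i - 1)).1 (pvInnerA A (i - 1)).2 := by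
  induction k with
  | zero =>
      intro i hi hm
      rw [PySem.List.pyRange_one_eq_nil (by omega)]
      rfl
  | succ k ih =>
      intro i hi hm
      have hfd : PySem.Int.floordiv ((A.length : Int) + 1) 2 = ((A.length : Int) + 1) / 2 :=
        PySem.Int.floordiv_eq_ediv_of_pos (by norm_num)
      have hin : i ≤ (A.length : Int) := by rw [hfd] at hm; omega
      have hstep := pvInnerA_step A (i - 1) (by omega)
      rw [sub_add_cancel] at hstep
      have hneg := pvNegIdx A i hi hin
      rw [PySem.List.pyRange_one_cons (by omega)]
      show (if (pvInnerA A i).1 ≤ (pvInnerA A i).2 then false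
            else pvOuterA A (PySem.List.pyRange (i + 1) (PySem.Int.floordiv ((A.length : Int) + 1) 2) 1)) = _
      rw [hstep, hneg]
      show _ = (if _ ≤ _ then false else pvAltLoop A (A.length) k (i + 1) _ _)
      by_cases hle : (pvInnerA A (i - 1)).1 + PySem.List.pyGetD A i 0 ≤
          (pvInnerA A (i - 1)).2 + PySem.List.pyGetD A ((A.length : Int) - i) 0
      · simp [hle]
      · simp only [if_neg hle]
        have := ih (i + 1) (by omega) (by push_cast at hm; omega)
        rw [add_sub_cancel_right] at this
        rw [this, hstep, hneg]

-- ===== VERDICT (by name: the statement is the Claim_ definition above) =====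
theorem inequal_length_subsets_check_spec : Claim_equal_inequal_length_subsets_check := by
  intro A _
  unfold Spec_inequal_length_subsets_check inequal_length_subsets_check inequal_length_subsets_check_alt
  have hfd : PySem.Int.floordiv ((A.length : Int) + 1) 2 = ((A.length : Int) + 1) / 2 :=
    PySem.Int.floordiv_eq_ediv_of_pos (by norm_num)
  by_cases h3 : (A.length : Int) < 3
  · rw [if_pos h3, PySem.List.pyRange_one_eq_nil (by rw [hfd]; omega)]
    rfl
  · rw [if_neg h3]
    have hm : (1 : Int) + ((PySem.Int.floordiv ((A.length : Int) + 1) 2 - 1).toNat : Int) =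
        PySem.Int.floordiv ((A.length : Int) + 1) 2 := by rw [hfd]; omega
    have := pvLoop_eq A (PySem.Int.floordiv ((A.length : Int) + 1) 2 - 1).toNat 1 le_rfl hm
    rw [this]
    norm_num [pvInnerA_zero]
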